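-- pv_equiv track=rewrite | github.com/capstone-dessert/mococo-recommend | api/endpoints/recommend.py | filter_by_weather
-- ===== SOURCE A (Python) =====
-- def filter_by_weather(clothes_list, min_temp=None, max_temp=None):
--     filtered_clothes = list(clothes_list)
--     if min_temp is not None and max_temp is not None:
--         if min_temp >= 10:
--             filtered_clothes = [item for item in filtered_clothes if
--                                 item["subcategory"] not in ["코트", "패딩", "점퍼", "무스탕"]]
--             if min_temp >= 15:
--                 filtered_clothes = [item for item in filtered_clothes if
--                                     item["subcategory"] not in ["후드 티셔츠", "맨투맨", "니트"]]
--                 if min_temp >= 20: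
--                     filtered_clothes = [item for item in filtered_clothes if item["category"] != ["아우터"]]
--
--         if max_temp <= 23:
--             filtered_clothes = [item for item in filtered_clothes if item["subcategory"] != "민소매 티셔츠"]
--             if max_temp <= 10:
--                 filtered_clothes = [item for item in filtered_clothes if not (
--                         (item["category"] == "상의" and item["subcategory"] in ["민소매 티셔츠", "반소매 티셔츠"]) or
--                         (item["category"] == "하의" and item["subcategory"] == "반바지")
--                 )]
--
--     return filtered_clothes
-- ===== SOURCE B (Python) =====
-- def filter_by_weather(clothes_list, min_temp=None, max_temp=None):
--     if min_temp is None or max_temp is None: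
--         return list(clothes_list)
--     checks = []
--     if min_temp >= 10:
--         checks.append(lambda it: it["subcategory"] not in ("코트", "패딩", "점퍼", "무스탕"))
--         if min_temp >= 15:
--             checks.append(lambda it: it["subcategory"] not in ("후드 티셔츠", "맨투맨", "니트"))
--             if min_temp >= 20:
--                 checks.append(lambda it: it["category"] != ["아우터"])
--     if max_temp <= 23:
--         checks.append(lambda it: it["subcategory"] != "민소매 티셔츠")
--         if max_temp <= 10:
--             checks.append(lambda it: not (
--                 (it["category"] == "상의" and it["subcategory"] in ("민소매 티셔츠", "반소매 티셔츠")) or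
--                 (it["category"] == "하의" and it["subcategory"] == "반바지")))
--     return [item for item in clothes_list if all(c(item) for c in checks)]
-- ===== Notes on version B (the rewrite author's own statement) =====
-- stated objective: alternative
-- what changed: Instead of rebuilding the list in up to five sequential filtering passes, B decides once from the temperature thresholds which sub-conditions apply, collects them as a list of predicates, and filters the list in a single pass keeping items that satisfy all applicable predicates.
import Mathlib
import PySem

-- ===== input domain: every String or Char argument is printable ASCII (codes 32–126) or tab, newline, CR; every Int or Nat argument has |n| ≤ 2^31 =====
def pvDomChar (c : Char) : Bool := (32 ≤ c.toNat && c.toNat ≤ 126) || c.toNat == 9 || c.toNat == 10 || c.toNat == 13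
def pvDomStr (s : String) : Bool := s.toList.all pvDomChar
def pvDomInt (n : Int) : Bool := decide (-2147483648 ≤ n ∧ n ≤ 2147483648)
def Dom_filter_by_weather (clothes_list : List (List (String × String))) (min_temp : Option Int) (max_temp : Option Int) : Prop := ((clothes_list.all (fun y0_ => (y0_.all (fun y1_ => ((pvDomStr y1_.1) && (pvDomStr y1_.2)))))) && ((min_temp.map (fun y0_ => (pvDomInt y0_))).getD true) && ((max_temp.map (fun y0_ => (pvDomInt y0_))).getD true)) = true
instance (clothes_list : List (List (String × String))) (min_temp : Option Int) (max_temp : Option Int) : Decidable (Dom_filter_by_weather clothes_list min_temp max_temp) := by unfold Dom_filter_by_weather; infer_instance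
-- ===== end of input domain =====

-- B replaces A's up-to-five sequential list-rebuilding passes by one pass with a predicate
-- assembled from the applicable threshold conditions (objective: alternative decomposition).
-- Items are dicts ported as association lists; item[k] is first-match lookup (PySem.Dict.get?).

-- ===== PORT A =====
-- item[k] in A; the default "" is never reached inside Pre_ (missing key = Python KeyError, excluded by Pre_)
def pvGet (item : List (String × String)) (k : String) : String :=
  (PySem.Dict.mk item).getD k ""

def filter_by_weather (clothes_list : List (List (String × String))) (min_temp : Option Int) (max_temp : Option Int) : List (List (String × String)) :=
  let filtered := clothes_list
  match min_temp, max_temp with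
  | some mn, some mx =>
    let f1 :=
      if 10 ≤ mn then
        let a := filtered.filter (fun item => !(["코트", "패딩", "점퍼", "무스탕"].contains (pvGet item "subcategory")))
        if 15 ≤ mn then
          let b := a.filter (fun item => !(["후드 티셔츠", "맨투맨", "니트"].contains (pvGet item "subcategory")))
          if 20 ≤ mn then
            -- Python: item["category"] != ["아우터"] compares a str with a list, hence always True
            b.filter (fun _ => true)
          else b
        else a
      else filtered
    if mx ≤ 23 then
      let c := f1.filter (fun item => pvGet item "subcategory" != "민소매 티셔츠")
      if mx ≤ 10 then
        c.filter (fun item => !(((pvGet item "category" == "상의") && (["민소매 티셔츠", "반소매 티셔츠"].contains (pvGet item "subcategory"))) ||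
                                ((pvGet item "category" == "하의") && (pvGet item "subcategory" == "반바지"))))
      else c
    else f1
  | _, _ => filtered

-- ===== PORT B =====
-- the applicable sub-conditions, decided once from the thresholds (B's `checks` list)
def pvChecks (mn : Int) (mx : Int) : List (List (String × String) → Bool) :=
  (if 10 ≤ mn then
    [fun it => !(["코트", "패딩", "점퍼", "무스탕"].contains (pvGet it "subcategory"))] ++
    (if 15 ≤ mn then
      [fun it => !(["후드 티셔츠", "맨투맨", "니트"].contains (pvGet it "subcategory"))] ++
      (if 20 ≤ mn then
        -- Python: it["category"] != ["아우터"] is always True (str vs list)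
        [fun _ => true]
      else [])
    else [])
  else []) ++
  (if mx ≤ 23 then
    [fun it => pvGet it "subcategory" != "민소매 티셔츠"] ++
    (if mx ≤ 10 then
      [fun it => !(((pvGet it "category" == "상의") && (["민소매 티셔츠", "반소매 티셔츠"].contains (pvGet it "subcategory"))) ||
                   ((pvGet it "category" == "하의") && (pvGet it "subcategory" == "반바지")))]
    else [])
  else [])

def filter_by_weather_alt (clothes_list : List (List (String × String))) (min_temp : Option Int) (max_temp : Option Int) : List (List (String × String)) :=
  match min_temp with
  | none => clothes_list
  | some mn =>
    match max_temp with
    | none => clothes_list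
    | some mx => clothes_list.filter (fun item => (pvChecks mn mx).all (fun c => c item))

-- ===== PRECONDITION & SPEC =====
-- Pre_ excludes exactly the inputs where A raises KeyError: when both temperatures are given
-- and a filtering pass runs, the items it scans must carry the key it looks up.
def Pre_filter_by_weather (clothes_list : List (List (String × String))) (min_temp : Option Int) (max_temp : Option Int) : Prop :=
  (min_temp.all (fun mn => max_temp.all (fun mx =>
    ((!(decide (10 ≤ mn) || decide (mx ≤ 23))) || clothes_list.all (fun item => ((PySem.Dict.mk item).get? "subcategory").isSome)) &&
    ((!(decide (20 ≤ mn) || decide (mx ≤ 10))) || clothes_list.all (fun item => ((PySem.Dict.mk item).get? "category").isSome))))) = true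
instance (clothes_list : List (List (String × String))) (min_temp : Option Int) (max_temp : Option Int) : Decidable (Pre_filter_by_weather clothes_list min_temp max_temp) := by unfold Pre_filter_by_weather; infer_instance

def pvWitness_filter_by_weather : (List (List (String × String))) × Option Int × Option Int :=
  ([[("subcategory", "shirt"), ("category", "top")]], some 21, some 25)

def Spec_filter_by_weather (clothes_list : List (List (String × String))) (min_temp : Option Int) (max_temp : Option Int) (out : List (List (String × String))) : Prop := out = filter_by_weather_alt clothes_list min_temp max_temp
instance (clothes_list : List (List (String × String))) (min_temp : Option Int) (max_temp : Option Int) (out : List (List (String × String))) : Decidable (Spec_filter_by_weather clothes_list min_temp max_temp out) := by unfold Spec_filter_by_weather; infer_instance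

-- ===== CLAIM (what is proved, stated in full; the proofs are below) =====
def Claim_equal_filter_by_weather : Prop := ∀ (clothes_list : List (List (String × String))) (min_temp : Option Int) (max_temp : Option Int), Dom_filter_by_weather clothes_list min_temp max_temp → Pre_filter_by_weather clothes_list min_temp max_temp → Spec_filter_by_weather clothes_list min_temp max_temp (filter_by_weather clothes_list min_temp max_temp)

-- ===== LEMMAS AND PROOFS =====

-- ===== VERDICT (by name: the statement is the Claim_ definition above) =====
theorem filter_by_weather_spec : Claim_equal_filter_by_weather := by
  intro cl mn? mx? _ _
  unfold Spec_filter_by_weather filter_by_weather filter_by_weather_alt pvChecks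
  cases mn? with
  | none => cases mx? <;> rfl
  | some mn =>
    cases mx? with
    | none => rfl
    | some mx =>
      simp only []
      split_ifs <;>
        first
          | rfl
          | (simp only [List.filter_filter, List.cons_append, List.nil_append, List.append_nil,
                List.all_cons, List.all_nil, Bool.and_true, List.filter_true]
             all_goals
               first
                 | rfl
                 | (congr 1
                    funext a
                    ac_rfl))
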